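-- pv_equiv track=rewrite | github.com/TsunamiTito/adventOfCode2024 | Day2/red_nosed_reports.py | check_only_ascending_or_descending_or_zero
-- ===== SOURCE A (Python) =====
-- def check_only_ascending_or_descending_or_zero(line):
--     if line[1] - line[0] > 0:
--         direction = "ascending"
--     elif line[1] - line[0] < 0:
--         direction = "descending"
--     else:
--         direction = "same"
--
--     count = 2
--
--     for place in line[:-2]:
--         if line[count] - line[count-1] > 0:
--             new_direction = "ascending"
--         elif line[count] - line[count-1] < 0:
--             new_direction = "descending"
--         else:
--             new_direction = "same"
--
--
--
--         if direction != new_direction: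
--             return False
--
--         count+=1
--
--     return True
-- ===== SOURCE B (Python) =====
-- def check_only_ascending_or_descending_or_zero(line):
--     pairs = list(zip(line, line[1:]))
--     return (all(a < b for a, b in pairs)
--             or all(a > b for a, b in pairs)
--             or all(a == b for a, b in pairs))
-- ===== Notes on version B (the rewrite author's own statement) =====
-- stated objective: simpler
-- what changed: B checks three global order properties (strictly increasing, strictly decreasing, all equal) in three separate passes over the consecutive pairs and ORs them, instead of A's single indexed loop that stores the first pair's direction string and early-returns on the first mismatch; no direction/sign values are computed at all.
import Mathlib
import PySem

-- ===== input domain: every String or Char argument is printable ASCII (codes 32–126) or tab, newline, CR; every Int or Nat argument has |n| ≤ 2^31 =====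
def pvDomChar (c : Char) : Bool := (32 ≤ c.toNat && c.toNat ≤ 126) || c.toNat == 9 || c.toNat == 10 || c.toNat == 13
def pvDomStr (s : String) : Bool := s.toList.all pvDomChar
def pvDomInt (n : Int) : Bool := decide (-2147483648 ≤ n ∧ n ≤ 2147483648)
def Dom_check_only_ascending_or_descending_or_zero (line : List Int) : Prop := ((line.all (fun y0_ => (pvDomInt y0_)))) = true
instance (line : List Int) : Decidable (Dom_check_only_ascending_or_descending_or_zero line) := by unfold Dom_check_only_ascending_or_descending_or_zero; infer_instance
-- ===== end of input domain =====

-- B replaces A's stored-direction single loop by three separate passes (strictly increasing / strictly decreasing / constant) OR'd together (simpler decomposition; equal return value on lists of length ≥ 2).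


-- ===== PORT A =====
-- Python's direction strings, computed by the same >0 / <0 / else chain
def pvDirA (d : Int) : String :=
  if d > 0 then "ascending" else if d < 0 then "descending" else "same"

-- the 'for place in line[:-2]' loop with its running index 'count'; line[count] via pyGetD
-- (in-range for every iteration on any input admitted by Pre_, so exact there)
def pvALoop (line : List Int) (dir : String) : List Int → Int → Bool
  | [], _ => true
  | _ :: rest, count =>
    let new_direction :=
      pvDirA (PySem.List.pyGetD line count 0 - PySem.List.pyGetD line (count - 1) 0)
    if dir ≠ new_direction then false else pvALoop line dir rest (count + 1)

def check_only_ascending_or_descending_or_zero (line : List Int) : Bool :=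
  -- line[1] - line[0]: IndexError when line has fewer than 2 elements (excluded by Pre_)
  let d0 := PySem.List.pyGetD line 1 0 - PySem.List.pyGetD line 0 0
  let direction := pvDirA d0
  pvALoop line direction (PySem.List.slice line none (some (-2))) 2

-- ===== PORT B =====
def check_only_ascending_or_descending_or_zero_alt (line : List Int) : Bool :=
  let pairs := line.zip line.tail
  (pairs.all (fun p => decide (p.1 < p.2)))
    || (pairs.all (fun p => decide (p.2 < p.1)))
    || (pairs.all (fun p => p.1 == p.2))

-- ===== PRECONDITION & SPEC =====
-- A raises IndexError (at line[1]) on lists of fewer than two elements; exactly those are excluded.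
def Pre_check_only_ascending_or_descending_or_zero (line : List Int) : Prop := 2 ≤ line.length
instance (line : List Int) : Decidable (Pre_check_only_ascending_or_descending_or_zero line) := by
  unfold Pre_check_only_ascending_or_descending_or_zero; infer_instance
def pvWitness_check_only_ascending_or_descending_or_zero : List Int := [1, 2, 3]

def Spec_check_only_ascending_or_descending_or_zero (line : List Int) (out : Bool) : Prop :=
  out = check_only_ascending_or_descending_or_zero_alt line
instance (line : List Int) (out : Bool) : Decidable (Spec_check_only_ascending_or_descending_or_zero line out) := by
  unfold Spec_check_only_ascending_or_descending_or_zero; infer_instance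

-- ===== CLAIM (what is proved, stated in full; the proofs are below) =====
def Claim_equal_check_only_ascending_or_descending_or_zero : Prop :=
  ∀ (line : List Int), Dom_check_only_ascending_or_descending_or_zero line →
    Pre_check_only_ascending_or_descending_or_zero line →
    Spec_check_only_ascending_or_descending_or_zero line (check_only_ascending_or_descending_or_zero line)


-- ===== LEMMAS AND PROOFS =====

-- sign of a difference, used only by the proof as a common reference value
def pvSign (d : Int) : Int := (if d > 0 then (1 : Int) else 0) - (if d < 0 then (1 : Int) else 0)

-- reference recursion: every consecutive pair in l has sign s
def pvAllSign (s : Int) : List Int → Bool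
  | a :: b :: t => (pvSign (b - a) == s) && pvAllSign s (b :: t)
  | _ => true

lemma pvDirA_eq_iff (a b : Int) : (pvDirA a = pvDirA b) ↔ pvSign a = pvSign b := by
  unfold pvDirA pvSign
  split_ifs <;> simp_all <;> omega

lemma pvAllSign_short (s : Int) (t : List Int) (h : t.length ≤ 1) : pvAllSign s t = true := by
  match t with
  | [] => rfl
  | [x] => rfl
  | a :: b :: r => simp at h

-- A's loop with count = c checks exactly the consecutive pairs of line.drop (c-1)
lemma pvALoop_eq (line : List Int) (d0 : Int) :
    ∀ (l : List Int) (c : Nat), 2 ≤ c → c + l.length = line.length →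
      pvALoop line (pvDirA d0) l ((c : Nat) : Int) = pvAllSign (pvSign d0) (line.drop (c - 1)) := by
  intro l
  induction l with
  | nil =>
    intro c hc hlen
    simp only [List.length_nil] at hlen
    have hshort : (line.drop (c - 1)).length ≤ 1 := by
      rw [List.length_drop]
      omega
    simp only [pvALoop]
    exact (pvAllSign_short _ _ hshort).symm
  | cons x rest ih =>
    intro c hc hlen
    simp only [List.length_cons] at hlen
    have hc1 : c - 1 < line.length := by omega
    have hcc : c < line.length := by omega
    have hget : PySem.List.pyGetD line ((c : Nat) : Int) 0 = line.getD c 0 :=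
      PySem.List.pyGetD_natCast ..
    have hget1 : PySem.List.pyGetD line (((c : Nat) : Int) - 1) 0 = line.getD (c - 1) 0 := by
      have hcast : ((c : Nat) : Int) - 1 = ((c - 1 : Nat) : Int) := by omega
      rw [hcast, PySem.List.pyGetD_natCast]
    have hdrop1 : line.drop (c - 1) = line.getD (c - 1) 0 :: line.drop c := by
      have e : c - 1 + 1 = c := by omega
      rw [List.drop_eq_getElem_cons hc1, e, List.getD_eq_getElem line 0 hc1]
    have hdrop2 : line.drop c = line.getD c 0 :: line.drop (c + 1) := by
      rw [List.drop_eq_getElem_cons hcc, List.getD_eq_getElem line 0 hcc]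
    have hrec := ih (c + 1) (by omega) (by omega)
    have hcast1 : ((c : Nat) : Int) + 1 = (((c + 1 : Nat)) : Int) := by omega
    simp only [pvALoop, hget, hget1, hcast1, hrec, Nat.add_sub_cancel]
    rw [hdrop1, hdrop2, pvAllSign]
    rw [← hdrop2]
    by_cases hs : pvSign (line.getD c 0 - line.getD (c - 1) 0) = pvSign d0
    · have hdir : pvDirA d0 = pvDirA (line.getD c 0 - line.getD (c - 1) 0) :=
        (pvDirA_eq_iff _ _).mpr hs.symm
      have hbeq : (pvSign (line.getD c 0 - line.getD (c - 1) 0) == pvSign d0) = true :=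
        beq_iff_eq.mpr hs
      rw [if_neg (fun hh => hh hdir), hbeq, Bool.true_and]
    · have hdir : pvDirA d0 ≠ pvDirA (line.getD c 0 - line.getD (c - 1) 0) :=
        fun h => hs (((pvDirA_eq_iff _ _).mp h).symm)
      have hbeq : (pvSign (line.getD c 0 - line.getD (c - 1) 0) == pvSign d0) = false :=
        beq_eq_false_iff_ne.mpr hs
      rw [if_pos hdir, hbeq, Bool.false_and]

lemma pvAllSign_eq_all (s : Int) :
    ∀ (l : List Int),
      pvAllSign s l = ((l.zip l.tail).all (fun p => pvSign (p.2 - p.1) == s)) := by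
  intro l
  induction l with
  | nil => rfl
  | cons a t ih =>
    cases t with
    | nil => rfl
    | cons b t' =>
      simp only [pvAllSign]
      rw [ih]
      simp

lemma signb_pos (x y : Int) : (pvSign (y - x) == (1 : Int)) = decide (x < y) := by
  unfold pvSign; split_ifs <;> simp <;> omega

lemma signb_neg (x y : Int) : (pvSign (y - x) == (-1 : Int)) = decide (y < x) := by
  unfold pvSign; split_ifs <;> simp <;> omega

lemma signb_zero (x y : Int) : (pvSign (y - x) == (0 : Int)) = (x == y) := by
  unfold pvSign; split_ifs <;> simp <;> omega

-- the sign-agreement pass equals the OR of the three global order checks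
lemma pv_key (a b : Int) (ps : List (Int × Int)) :
    (ps.all (fun p => pvSign (p.2 - p.1) == pvSign (b - a)))
      = ((((a, b) :: ps).all (fun p => decide (p.1 < p.2)))
          || (((a, b) :: ps).all (fun p => decide (p.2 < p.1)))
          || (((a, b) :: ps).all (fun p => p.1 == p.2))) := by
  rcases lt_trichotomy a b with h | h | h
  · have hs : pvSign (b - a) = 1 := by unfold pvSign; split_ifs <;> omega
    simp only [hs, List.all_cons, signb_pos, decide_eq_true h, Bool.true_and]
    have h2 : decide (b < a) = false := by simp; omega
    have h3 : (a == b) = false := by simp; omega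
    simp [h2, h3]
  · have hs : pvSign (b - a) = 0 := by unfold pvSign; split_ifs <;> omega
    simp only [hs, List.all_cons, signb_zero]
    have h1 : decide (a < b) = false := by simp; omega
    have h2 : decide (b < a) = false := by simp; omega
    simp [h]
  · have hs : pvSign (b - a) = -1 := by unfold pvSign; split_ifs <;> omega
    simp only [hs, List.all_cons, signb_neg, decide_eq_true h, Bool.true_and]
    have h1 : decide (a < b) = false := by simp; omega
    have h3 : (a == b) = false := by simp; omega
    simp [h1, h3]

-- ===== VERDICT =====
theorem check_only_ascending_or_descending_or_zero_spec :
    Claim_equal_check_only_ascending_or_descending_or_zero := by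
  intro line _ hpre
  unfold Pre_check_only_ascending_or_descending_or_zero at hpre
  unfold Spec_check_only_ascending_or_descending_or_zero
  match line, hpre with
  | x0 :: x1 :: rest, _ =>
    have hlen : (x0 :: x1 :: rest).length = rest.length + 2 := by simp
    unfold check_only_ascending_or_descending_or_zero
    have hd0 : PySem.List.pyGetD (x0 :: x1 :: rest) 1 0 - PySem.List.pyGetD (x0 :: x1 :: rest) 0 0
        = x1 - x0 := by
      have h1 : (1 : Int) = ((1 : Nat) : Int) := rfl
      have h0 : (0 : Int) = ((0 : Nat) : Int) := rfl
      rw [h1, h0, PySem.List.pyGetD_natCast, PySem.List.pyGetD_natCast]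
      simp
    have hslice : PySem.List.slice (x0 :: x1 :: rest) none (some (-2))
        = (x0 :: x1 :: rest).take ((x0 :: x1 :: rest).length - 2) := by
      rw [PySem.List.slice_to_neg_ofNat _ 2 (by omega)]
    have h2 : (2 : Int) = ((2 : Nat) : Int) := rfl
    rw [hd0, hslice, h2,
      pvALoop_eq (x0 :: x1 :: rest) (x1 - x0) _ 2 (by omega)
        (by rw [List.length_take, hlen]; omega)]
    have hA : (x0 :: x1 :: rest).drop (2 - 1) = x1 :: rest := rfl
    rw [hA, pvAllSign_eq_all]
    unfold check_only_ascending_or_descending_or_zero_alt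
    have hzip : (x0 :: x1 :: rest).zip (x0 :: x1 :: rest).tail
        = (x0, x1) :: ((x1 :: rest).zip rest) := by simp
    simp only [hzip]
    have := pv_key x0 x1 ((x1 :: rest).zip rest)
    simp only [List.tail_cons] at this ⊢
    exact this
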